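-- pv_equiv track=rewrite | github.com/cdeust/Cortex | mcp_server/handlers/wiki_synthesize.py | _infer_kind
-- ===== SOURCE A (Python) =====
-- _TYPE_TO_KIND_AFFINITY: dict[str, str] = {
--     "decision": "adr",
--     "limitation": "lesson",
--     "method": "spec",
--     "result": "spec",
--     "observation": "note",
--     "question": "note",
--     "reference": "note",
--     "assertion": "note",
-- }
--
-- def _infer_kind(claims: list[dict], available_kinds: set[str]) -> str:
--     """Pick a target kind from the dominant claim_type."""
--     if not claims:
--         return "note"
--     counts: dict[str, int] = {}
--     for c in claims:
--         kind = _TYPE_TO_KIND_AFFINITY.get(c.get("claim_type", ""), "note")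
--         counts[kind] = counts.get(kind, 0) + 1
--     # Prefer adr / lesson / convention over note when present
--     for preferred in ("adr", "lesson", "convention", "spec", "note"):
--         if counts.get(preferred):
--             if not available_kinds or preferred in available_kinds:
--                 return preferred
--     return "note"
-- ===== SOURCE B (Python) =====
-- _TYPE_TO_KIND_AFFINITY: dict[str, str] = {
--     "decision": "adr",
--     "limitation": "lesson",
--     "method": "spec",
--     "result": "spec",
--     "observation": "note",
--     "question": "note",
--     "reference": "note",
--     "assertion": "note",
-- }
--
-- def _infer_kind(claims: list[dict], available_kinds: set[str]) -> str:
--     """Pick a target kind from the dominant claim_type.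
--
--     Single pass: track the best (lowest) priority rank seen among the kinds
--     that are allowed by available_kinds, then index the answer by rank.
--     ("convention" from A's priority tuple is unreachable: no claim_type maps to it.)
--     """
--     best = 4
--     for c in claims:
--         k = _TYPE_TO_KIND_AFFINITY.get(c.get("claim_type", ""), "note")
--         if not available_kinds or k in available_kinds:
--             r = 0 if k == "adr" else 1 if k == "lesson" else 2 if k == "spec" else 3
--             if r < best:
--                 best = r
--     return ("adr", "lesson", "spec", "note", "note")[best]
-- ===== Notes on version B (the rewrite author's own statement) =====
-- stated objective: alternative
-- what changed: Replaces the counts dict plus priority-tuple scan by a single pass that folds the minimum priority rank of the allowed kinds and indexes the answer by that rank.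
import Mathlib
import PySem

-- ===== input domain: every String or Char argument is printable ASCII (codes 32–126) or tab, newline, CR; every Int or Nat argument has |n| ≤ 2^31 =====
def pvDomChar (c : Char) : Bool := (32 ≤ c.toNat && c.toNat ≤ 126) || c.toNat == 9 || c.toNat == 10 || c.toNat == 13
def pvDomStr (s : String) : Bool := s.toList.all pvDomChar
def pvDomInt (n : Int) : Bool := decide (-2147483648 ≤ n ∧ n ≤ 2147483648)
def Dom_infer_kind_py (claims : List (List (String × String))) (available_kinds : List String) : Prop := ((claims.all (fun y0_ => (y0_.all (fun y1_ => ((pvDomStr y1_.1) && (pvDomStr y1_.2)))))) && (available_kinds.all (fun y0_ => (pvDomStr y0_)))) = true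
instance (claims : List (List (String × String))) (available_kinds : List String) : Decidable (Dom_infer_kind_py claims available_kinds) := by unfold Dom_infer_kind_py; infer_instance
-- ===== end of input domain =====

-- B replaces A's counts dict + priority-tuple scan by a single pass folding the minimum
-- priority rank of the allowed kinds, then indexes the answer by that rank (objective:
-- alternative; same return value everywhere).

-- shared module constant _TYPE_TO_KIND_AFFINITY and the kind of one claim dict
def pvAffinity : PySem.Dict String String :=
  PySem.Dict.ofList [("decision","adr"),("limitation","lesson"),("method","spec"),("result","spec"),
    ("observation","note"),("question","note"),("reference","note"),("assertion","note")]

def pvKindOf (c : List (String × String)) : String :=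
  pvAffinity.getD ((PySem.Dict.mk c).getD "claim_type" "") "note"

-- ===== PORT A =====
def pvCountsA (claims : List (List (String × String))) : PySem.Dict String Int :=
  claims.foldl (fun d c => d.insert (pvKindOf c) (d.getD (pvKindOf c) 0 + 1)) PySem.Dict.empty

def pvPickA (counts : PySem.Dict String Int) (avail : List String) : List String → String
  | [] => "note"
  | p :: rest =>
    if counts.getD p 0 ≠ 0 then
      if avail.isEmpty || avail.contains p then p else pvPickA counts avail rest
    else pvPickA counts avail rest

def infer_kind_py (claims : List (List (String × String))) (available_kinds : List String) : String :=
  if claims.isEmpty then "note"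
  else pvPickA (pvCountsA claims) available_kinds ["adr","lesson","convention","spec","note"]

-- ===== PORT B =====
def pvRankB (k : String) : Nat :=
  if k == "adr" then 0 else if k == "lesson" then 1 else if k == "spec" then 2 else 3

def pvBestStep (avail : List String) (best : Nat) (c : List (String × String)) : Nat :=
  if avail.isEmpty || avail.contains (pvKindOf c) then
    if pvRankB (pvKindOf c) < best then pvRankB (pvKindOf c) else best
  else best

-- the tuple index ("adr","lesson","spec","note","note")[best] is exact: best ≤ 4 always
def infer_kind_py_alt (claims : List (List (String × String))) (available_kinds : List String) : String :=
  ["adr","lesson","spec","note","note"].getD (claims.foldl (pvBestStep available_kinds) 4) "note"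

-- ===== PRECONDITION & SPEC =====
def Spec_infer_kind_py (claims : List (List (String × String))) (available_kinds : List String) (out : String) : Prop := out = infer_kind_py_alt claims available_kinds
instance (claims : List (List (String × String))) (available_kinds : List String) (out : String) : Decidable (Spec_infer_kind_py claims available_kinds out) := by unfold Spec_infer_kind_py; infer_instance

-- ===== CLAIM (what is proved, stated in full; the proofs are below) =====
def Claim_equal_infer_kind_py : Prop := ∀ (claims : List (List (String × String))) (available_kinds : List String), Dom_infer_kind_py claims available_kinds → Spec_infer_kind_py claims available_kinds (infer_kind_py claims available_kinds)

-- ===== LEMMAS AND PROOFS =====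

-- a claim's kind is one of the four affinity values (so "convention" never occurs)
theorem pvKindOf_mem (c : List (String × String)) :
    pvKindOf c = "adr" ∨ pvKindOf c = "lesson" ∨ pvKindOf c = "spec" ∨ pvKindOf c = "note" := by
  unfold pvKindOf pvAffinity
  generalize (PySem.Dict.mk c).getD "claim_type" "" = s
  simp only [PySem.Dict.getD, PySem.Dict.get?, PySem.Dict.ofList]
  have hit : (PySem.Dict.empty.update
      [("decision","adr"),("limitation","lesson"),("method","spec"),("result","spec"),
       ("observation","note"),("question","note"),("reference","note"),("assertion","note")]).items
      = [("decision","adr"),("limitation","lesson"),("method","spec"),("result","spec"),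
         ("observation","note"),("question","note"),("reference","note"),("assertion","note")] := by decide
  rw [hit]
  cases hf : List.find? (fun p => p.1 == s)
      [("decision","adr"),("limitation","lesson"),("method","spec"),("result","spec"),
       ("observation","note"),("question","note"),("reference","note"),("assertion","note")] with
  | none => simp
  | some pr =>
    have hm := List.mem_of_find?_eq_some hf
    fin_cases hm <;> simp

-- "kind k occurs in claims and k is admissible under avail"
def pvHas (claims : List (List (String × String))) (avail : List String) (k : String) : Bool :=
  claims.any (fun c => pvKindOf c == k) && (avail.isEmpty || avail.contains k)

-- the counts table read back: counts[k] is the number of claims whose kind is k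
theorem pvCounts_getD (claims : List (List (String × String))) (d : PySem.Dict String Int) (k : String) :
    (claims.foldl (fun d c => d.insert (pvKindOf c) (d.getD (pvKindOf c) 0 + 1)) d).getD k 0
      = d.getD k 0 + (claims.countP (fun c => pvKindOf c == k) : Int) := by
  induction claims generalizing d with
  | nil => simp
  | cons c cs ih =>
    simp only [List.foldl_cons, List.countP_cons, ih, PySem.Dict.getD_insert]
    by_cases h : k = pvKindOf c
    · simp [h]; ring
    · have hb : (pvKindOf c == k) = false := by simpa using (Ne.symm h)
      simp [h, hb]

theorem pvCounts_ne_zero_iff (claims : List (List (String × String))) (k : String) :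
    ((pvCountsA claims).getD k 0 ≠ 0) ↔ (claims.any (fun c => pvKindOf c == k) = true) := by
  rw [pvCountsA, pvCounts_getD]
  simp [PySem.Dict.getD_empty, List.any_eq_true]

-- A's priority scan as a chain over pvHas
def pvChain (claims : List (List (String × String))) (avail : List String) : List String → String
  | [] => "note"
  | p :: rest => if pvHas claims avail p then p else pvChain claims avail rest

theorem pvPick_eq_chain (claims : List (List (String × String))) (avail : List String)
    (ps : List String) :
    pvPickA (pvCountsA claims) avail ps = pvChain claims avail ps := by
  induction ps with
  | nil => rfl
  | cons p rest ih =>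
    rw [pvPickA, pvChain]
    have hH : pvHas claims avail p
        = ((claims.any fun c => pvKindOf c == p) && (avail.isEmpty || avail.contains p)) := rfl
    cases hp : (claims.any fun c => pvKindOf c == p) with
    | true =>
      rw [if_pos ((pvCounts_ne_zero_iff claims p).mpr hp)]
      cases ha : (avail.isEmpty || avail.contains p) with
      | true =>
        have h1 : pvHas claims avail p = true := by rw [hH, hp, ha, Bool.true_and]
        rw [if_pos rfl, if_pos h1]
      | false =>
        have h1 : pvHas claims avail p = false := by rw [hH, hp, ha, Bool.true_and]
        rw [if_neg Bool.false_ne_true, if_neg (h1 ▸ Bool.false_ne_true), ih]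
    | false =>
      have h1 : pvHas claims avail p = false := by rw [hH, hp, Bool.false_and]
      rw [if_neg (fun hc => Bool.false_ne_true (hp ▸ (pvCounts_ne_zero_iff claims p).mp hc)),
          if_neg (h1 ▸ Bool.false_ne_true), ih]

-- B's fold: each step can only decrease the accumulator
theorem pvBestStep_le (avail : List String) (b : Nat) (c : List (String × String)) :
    pvBestStep avail b c ≤ b := by
  unfold pvBestStep; split_ifs <;> omega

theorem pvFold_le (avail : List String) (claims : List (List (String × String))) (b : Nat) :
    claims.foldl (pvBestStep avail) b ≤ b := by
  induction claims generalizing b with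
  | nil => simp
  | cons c cs ih => exact le_trans (ih _) (pvBestStep_le avail b c)

-- the fold from b equals min b (fold from 4)
theorem pvFold_min (avail : List String) (claims : List (List (String × String))) (b : Nat)
    (hb : b ≤ 4) :
    claims.foldl (pvBestStep avail) b = min b (claims.foldl (pvBestStep avail) 4) := by
  induction claims generalizing b with
  | nil => simp [Nat.min_eq_left hb]
  | cons c cs ih =>
    simp only [List.foldl_cons]
    rw [ih (pvBestStep avail b c) (le_trans (pvBestStep_le avail b c) hb),
        ih (pvBestStep avail 4 c) (pvBestStep_le avail 4 c)]
    have hM := pvFold_le avail cs (pvBestStep avail 4 c)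
    have h4 := pvBestStep_le avail 4 c
    unfold pvBestStep
    split_ifs <;> omega

-- B's fold from 4 computes the least allowed rank present, via the same if-chain
theorem pvFold_char (avail : List String) (claims : List (List (String × String))) :
    claims.foldl (pvBestStep avail) 4
      = (if pvHas claims avail "adr" then 0 else if pvHas claims avail "lesson" then 1
         else if pvHas claims avail "spec" then 2 else if pvHas claims avail "note" then 3 else 4) := by
  induction claims with
  | nil => simp [pvHas]
  | cons c cs ih =>
    rw [List.foldl_cons, pvFold_min avail cs _ (pvBestStep_le avail 4 c), ih]
    have hmem := pvKindOf_mem c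
    unfold pvBestStep pvRankB
    simp only [pvHas, List.any_cons] at *
    rcases hmem with h | h | h | h <;>
      by_cases ha : (avail.isEmpty || avail.contains (pvKindOf c)) = true <;>
        simp only [h] at ha ⊢ <;> simp [ha] <;> split_ifs <;> simp_all

-- "convention" never occurs as a kind
theorem pvHas_convention (claims : List (List (String × String))) (avail : List String) :
    pvHas claims avail "convention" = false := by
  simp only [pvHas, Bool.and_eq_false_iff, List.any_eq_false]
  left; intro c _
  rcases pvKindOf_mem c with h | h | h | h <;> simp [h]

-- ===== VERDICT (by name: the statement is the Claim_ definition above) =====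
theorem infer_kind_py_spec : Claim_equal_infer_kind_py := by
  intro claims avail _
  unfold Spec_infer_kind_py infer_kind_py infer_kind_py_alt
  rw [pvFold_char]
  by_cases he : claims.isEmpty
  · rw [if_pos he]
    have : claims = [] := List.isEmpty_iff.mp he
    subst this
    simp [pvHas]
  · rw [if_neg he, pvPick_eq_chain]
    simp only [pvChain, pvHas_convention, Bool.false_eq_true, if_false]
    split_ifs <;> rfl
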